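-- pv_equiv track=rewrite | github.com/sOliverJr/AdventOfCode_2023 | Day13/day13_part1.py | is_vertical_symmetrical_axis
-- ===== SOURCE A (Python) =====
-- def is_vertical_symmetrical_axis(offset, field):
--     if offset == 0 or offset >= len(field):
--         return False
--     top = field[:offset][::-1]
--     bottom = field[offset:]
--     for i, line in enumerate(top):
--         if i >= (len(bottom)):
--             return True
--         if line != bottom[i]:
--             return False
--     return True
-- ===== SOURCE B (Python) =====
-- # Palindrome-window formulation: the maximal window centered on the axis must read
-- # the same forwards and backwards; no explicit pairwise loop.
-- def is_vertical_symmetrical_axis(offset, field):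
--     if offset <= 0 or offset >= len(field):
--         return False
--     k = min(offset, len(field) - offset)
--     window = field[offset - k : offset + k]
--     return window == window[::-1]
-- ===== Notes on version B (the rewrite author's own statement) =====
-- stated objective: simpler
-- what changed: Replaces A's reversed-slice plus enumerate/index early-return loop with a closed-form palindrome test: extract the maximal window centered on the axis and check it equals its own reversal.
-- outside the precondition, e.g. on is_vertical_symmetrical_axis(-1, ['a', 'a']): A returns True, B returns False
import Mathlib
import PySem

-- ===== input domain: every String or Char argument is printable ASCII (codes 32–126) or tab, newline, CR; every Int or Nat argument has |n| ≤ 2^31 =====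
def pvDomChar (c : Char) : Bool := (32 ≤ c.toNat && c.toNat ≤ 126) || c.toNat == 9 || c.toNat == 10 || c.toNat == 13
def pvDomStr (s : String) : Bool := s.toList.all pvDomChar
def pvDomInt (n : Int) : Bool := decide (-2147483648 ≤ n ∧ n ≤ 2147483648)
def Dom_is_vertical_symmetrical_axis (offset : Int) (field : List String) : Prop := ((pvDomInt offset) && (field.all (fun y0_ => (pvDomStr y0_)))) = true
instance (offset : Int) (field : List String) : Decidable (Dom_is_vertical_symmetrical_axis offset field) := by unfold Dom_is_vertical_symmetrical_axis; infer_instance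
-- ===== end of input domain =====

-- B is simpler: a closed-form palindrome test of the maximal window centered on the axis, replacing A's reversed-slice + enumerate early-return loop.
-- ===== PORT A =====
-- the 'for i, line in enumerate(top)' loop of A, with 'bottom' fixed
def pvALoop (bottom : List String) : List (Int × String) → Bool
  | [] => true
  | (i, line) :: rest =>
    if i ≥ (bottom.length : Int) then true
    else if line ≠ PySem.List.pyGetD bottom i "" then false
    else pvALoop bottom rest

def is_vertical_symmetrical_axis (offset : Int) (field : List String) : Bool :=
  if offset == 0 || offset ≥ (field.length : Int) then false
  else
    let top := (PySem.List.slice field none (some offset)).reverse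
    let bottom := PySem.List.slice field (some offset) none
    pvALoop bottom (PySem.List.enumerate top)

-- ===== PORT B =====
def is_vertical_symmetrical_axis_alt (offset : Int) (field : List String) : Bool :=
  if offset ≤ 0 || offset ≥ (field.length : Int) then false
  else
    let k := min offset ((field.length : Int) - offset)
    let window := PySem.List.slice field (some (offset - k)) (some (offset + k))
    window == window.reverse   -- window[::-1] is window.reverse (PySem.List.slice?_none_none_neg_one)

-- ===== PRECONDITION & SPEC =====
-- Pre_ excludes negative offsets: outside the natural domain of a mirror-axis index, where
-- A's returned value is an artefact of Python's negative-slice wraparound; B returns False there.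
def Pre_is_vertical_symmetrical_axis (offset : Int) (field : List String) : Prop := 0 ≤ offset
instance (offset : Int) (field : List String) : Decidable (Pre_is_vertical_symmetrical_axis offset field) := by unfold Pre_is_vertical_symmetrical_axis; infer_instance
def pvWitness_is_vertical_symmetrical_axis : Int × List String := (1, ["ab", "ab", "cd"])
def Spec_is_vertical_symmetrical_axis (offset : Int) (field : List String) (out : Bool) : Prop := out = is_vertical_symmetrical_axis_alt offset field
instance (offset : Int) (field : List String) (out : Bool) : Decidable (Spec_is_vertical_symmetrical_axis offset field out) := by unfold Spec_is_vertical_symmetrical_axis; infer_instance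

-- ===== CLAIM (what is proved, stated in full; the proofs are below) =====
def Claim_equal_is_vertical_symmetrical_axis : Prop := ∀ (offset : Int) (field : List String), Dom_is_vertical_symmetrical_axis offset field → Pre_is_vertical_symmetrical_axis offset field → Spec_is_vertical_symmetrical_axis offset field (is_vertical_symmetrical_axis offset field)

-- ===== LEMMAS AND PROOFS =====
-- A's loop compares top[k] with bottom[k] until one side runs out: it is 'all equal' on the zip.
theorem pvALoop_eq (bottom : List String) (top : List String) (s : Nat) :
    pvALoop bottom (PySem.List.enumerate top (s : Int)) =
      (top.zip (bottom.drop s)).all (fun p => p.1 == p.2) := by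
  induction top generalizing s with
  | nil => simp [PySem.List.enumerate_nil, pvALoop]
  | cons x xs ih =>
    rw [PySem.List.enumerate_cons]
    by_cases h : s ≥ bottom.length
    · have hd : bottom.drop s = [] := List.drop_eq_nil_of_le h
      simp [pvALoop, hd]
      omega
    · push_neg at h
      have hd : bottom.drop s = bottom[s] :: bottom.drop (s + 1) :=
        List.drop_eq_getElem_cons h
      have hcast : ((s : Int) + 1) = ((s + 1 : Nat) : Int) := by push_cast; ring
      have hg : PySem.List.pyGetD bottom (s : Int) "" = bottom[s] := by
        rw [PySem.List.pyGetD_natCast]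
        simp [List.getD, List.getElem?_eq_getElem h]
      rw [pvALoop, if_neg (by exact_mod_cast not_le.mpr h), hcast, ih (s + 1), hd,
        List.zip_cons_cons, List.all_cons, hg]
      by_cases hx : x = bottom[s] <;> simp [hx]

-- 'all pairs equal' on the zip of two equal-length lists is the lists' equality.
theorem pvAllZip_eq {α : Type} [DecidableEq α] (p q : List α) (h : p.length = q.length) :
    ((p.zip q).all (fun x => x.1 == x.2)) = (p == q) := by
  induction p generalizing q with
  | nil => cases q <;> simp_all
  | cons x xs ih =>
    cases q with
    | nil => simp_all
    | cons y ys =>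
      simp only [List.zip_cons_cons, List.all_cons, List.cons_beq_cons]
      rw [ih ys (by simpa using h)]

-- half-window equality is the full-window palindrome condition (|L| = |R|)
theorem pvPalindrome_iff {α : Type} [DecidableEq α] (L R : List α)
    (h : L.length = R.length) :
    (L.reverse == R) = (L ++ R == (L ++ R).reverse) := by
  rw [List.reverse_append]
  apply Bool.coe_iff_coe.mp
  simp only [beq_iff_eq]
  constructor
  · intro hLR
    rw [← hLR, List.reverse_reverse]
  · intro hEq
    have := (List.append_inj hEq (by simp [h])).1
    rw [this, List.reverse_reverse]

-- ===== VERDICT (by name: the statement is the Claim_ definition above) =====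
theorem is_vertical_symmetrical_axis_spec : Claim_equal_is_vertical_symmetrical_axis := by
  intro offset field _ hpre
  unfold Spec_is_vertical_symmetrical_axis is_vertical_symmetrical_axis is_vertical_symmetrical_axis_alt
  unfold Pre_is_vertical_symmetrical_axis at hpre
  by_cases h0 : offset = 0
  · simp [h0]
  · by_cases hlen : offset ≥ (field.length : Int)
    · simp [hlen]
    · push_neg at hlen
      have hpos : 0 < offset := lt_of_le_of_ne hpre (Ne.symm h0)
      rw [if_neg (by simp; omega), if_neg (by simp; omega)]
      simp only
      obtain ⟨a, rfl⟩ : ∃ a : Nat, offset = (a : Int) := ⟨offset.toNat, by omega⟩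
      have han : a < field.length := by exact_mod_cast hlen
      set n := field.length with hn
      set k := min a (n - a) with hk
      have hka : k ≤ a := min_le_left _ _
      have hkna : k ≤ n - a := min_le_right _ _
      -- the Int-side window bounds are casts of Nat bounds
      have hmin : min (a : Int) ((n : Int) - (a : Int)) = (k : Int) := by
        rw [hk]; push_cast [Nat.cast_min]; omega
      have hlo : (a : Int) - min (a : Int) ((n : Int) - (a : Int)) = ((a - k : Nat) : Int) := by
        rw [hmin]; omega
      have hhi : (a : Int) + min (a : Int) ((n : Int) - (a : Int)) = ((a + k : Nat) : Int) := by
        rw [hmin]; push_cast; ring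
      rw [hlo, hhi, PySem.List.slice_natCast, PySem.List.slice_to_natCast,
        PySem.List.slice_from_natCast]
      have h2k : a + k - (a - k) = k + k := by omega
      rw [h2k, List.take_add, List.drop_drop]
      have hak : a - k + k = a := by omega
      rw [hak]
      set L := (field.drop (a - k)).take k with hL
      set R := (field.drop a).take k with hR
      have hLlen : L.length = k := by
        rw [hL]; simp; omega
      have hRlen : R.length = k := by
        rw [hR]; simp; omega
      -- A side: zip of reversed prefix with suffix, truncated to length k
      have hsplit : field.take a = field.take (a - k) ++ L := by
        rw [hL]
        conv_lhs => rw [show a = (a - k) + k from by omega, List.take_add]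
      have htopT : (field.take a).reverse = L.reverse ++ (field.take (a - k)).reverse := by
        rw [hsplit, List.reverse_append]
      have hbotT : field.drop a = R ++ (field.drop a).drop k := by
        rw [hR, List.take_append_drop]
      have hA := pvALoop_eq (field.drop a) ((field.take a).reverse) 0
      simp only [Nat.cast_zero, List.drop_zero] at hA
      rw [hA, htopT, hbotT]
      have hzip : (L.reverse ++ (field.take (a - k)).reverse).zip (R ++ (field.drop a).drop k)
          = L.reverse.zip R ++ ((field.take (a - k)).reverse).zip ((field.drop a).drop k) := by
        apply List.zip_append
        simp [hLlen, hRlen]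
      rw [hzip]
      -- one of the leftover halves is empty: k = min a (n-a)
      have hempty : ((field.take (a - k)).reverse).zip ((field.drop a).drop k) = [] := by
        rcases Nat.le_total a (n - a) with hle | hlt
        · have : a - k = 0 := by omega
          simp [this]
        · have : (field.drop a).drop k = [] := by
            apply List.drop_eq_nil_of_le
            simp; omega
          simp [this]
      rw [hempty, List.append_nil,
        pvAllZip_eq L.reverse R (by simp [hLlen, hRlen]),
        pvPalindrome_iff L R (by rw [hLlen, hRlen])]
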